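-- pv_equiv track=rewrite | github.com/Sierraki/Solutions | 力扣&Leetcode/算法&algorithm/面试题 05.06.整数转换.py | convertInteger
-- ===== SOURCE A (Python) =====
-- def convertInteger(A: int, B: int) -> int:
--     res1 = bin(A & 0xFFFFFFFF)[2:]
--     res2 = bin(B & 0xFFFFFFFF)[2:]
--     n = max(len(res1), len(res2))
--     ans1 = res1.zfill(n)
--     ans2 = res2.zfill(n)
--     ans = 0
--     for i in range(n):
--         if ans1[i] != ans2[i]:
--             ans += 1
--     return ans
-- ===== SOURCE B (Python) =====
-- def convertInteger(A: int, B: int) -> int: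
--     x = (A ^ B) & 0xFFFFFFFF
--     c = 0
--     while x:
--         x &= x - 1
--         c += 1
--     return c
-- ===== Notes on version B (the rewrite author's own statement) =====
-- stated objective: simpler
-- what changed: Replaces building, slicing and zero-padding two binary strings and comparing them character by character with a direct Kernighan bit-count of the masked XOR (x &= x-1 until zero).
import Mathlib
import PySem

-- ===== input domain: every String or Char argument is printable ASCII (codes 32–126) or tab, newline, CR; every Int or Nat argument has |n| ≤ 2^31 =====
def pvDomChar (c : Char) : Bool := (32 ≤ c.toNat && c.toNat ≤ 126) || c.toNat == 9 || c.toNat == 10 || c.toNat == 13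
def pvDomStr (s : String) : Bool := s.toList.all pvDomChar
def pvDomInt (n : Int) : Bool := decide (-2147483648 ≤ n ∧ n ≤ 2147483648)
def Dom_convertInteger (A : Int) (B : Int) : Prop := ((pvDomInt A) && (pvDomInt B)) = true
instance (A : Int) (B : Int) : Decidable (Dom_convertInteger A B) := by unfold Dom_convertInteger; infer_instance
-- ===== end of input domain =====

-- B replaces A's build/slice/zero-pad of two binary strings compared character by character
-- with a direct Kernighan bit-count (x &= x-1) of the masked XOR; objective: simpler.

-- ===== PORT A =====
def convertInteger (A : Int) (B : Int) : Int :=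
  let res1 := PySem.Str.slice (PySem.Int.pyBin (PySem.Int.band A 0xFFFFFFFF)) (some 2) none
  let res2 := PySem.Str.slice (PySem.Int.pyBin (PySem.Int.band B 0xFFFFFFFF)) (some 2) none
  let n : Int := max (PySem.Str.len res1) (PySem.Str.len res2)
  let ans1 := PySem.Str.zfill res1 n
  let ans2 := PySem.Str.zfill res2 n
  (PySem.List.pyRange 0 n 1).foldl
    (fun ans i => if PySem.Str.pyGet? ans1 i ≠ PySem.Str.pyGet? ans2 i then ans + 1 else ans) 0

-- ===== PORT B =====
-- the 'while x: x &= x - 1; c += 1' loop of Source B; Source B only ever runs it with x ≥ 0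
-- (x is masked with 0xFFFFFFFF), so the guard is written 0 < x to make the recursion
-- well-founded (for x = 0 Python's loop does not run either; negative x never occurs).
def kernLoop (x : Int) (c : Int) : Int :=
  if h : 0 < x then kernLoop (PySem.Int.band x (x - 1)) (c + 1) else c
termination_by x.toNat
decreasing_by
  rw [PySem.Int.band_of_nonneg (by omega) (by omega)]
  have h1 : x.toNat &&& (x - 1).toNat ≤ (x - 1).toNat := Nat.and_le_right
  omega

def convertInteger_alt (A : Int) (B : Int) : Int :=
  kernLoop (PySem.Int.band (PySem.Int.bxor A B) 0xFFFFFFFF) 0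

-- ===== PRECONDITION & SPEC =====
def Spec_convertInteger (A : Int) (B : Int) (out : Int) : Prop := out = convertInteger_alt A B
instance (A : Int) (B : Int) (out : Int) : Decidable (Spec_convertInteger A B out) := by unfold Spec_convertInteger; infer_instance

-- ===== CLAIM (what is proved, stated in full; the proofs are below) =====
def Claim_equal_convertInteger : Prop := ∀ (A : Int) (B : Int), Dom_convertInteger A B → Spec_convertInteger A B (convertInteger A B)

-- ===== LEMMAS AND PROOFS =====

/-- Bit-count by repeated halving: the common yardstick both ports are reduced to. -/
def pc (n : Nat) : Nat :=
  if h : n = 0 then 0 else n % 2 + pc (n / 2)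
decreasing_by exact Nat.div_lt_self (Nat.pos_of_ne_zero h) one_lt_two

lemma pc_zero : pc 0 = 0 := by rw [pc]; simp

lemma pc_eq (n : Nat) : pc n = n % 2 + pc (n / 2) := by
  by_cases h : n = 0
  · subst h; simp [pc_zero]
  · rw [pc]; simp [h]

lemma pc_double (q : Nat) : pc (2 * q) = pc q := by
  rw [pc_eq]
  simp [Nat.mul_mod_right, Nat.mul_div_cancel_left _ (by norm_num : (0:Nat) < 2)]

-- n % 2 = 1 → n &&& (n-1) = n - 1
lemma and_pred_odd (n : Nat) (h : n % 2 = 1) : n &&& (n - 1) = n - 1 := by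
  apply Nat.eq_of_testBit_eq
  intro i
  cases i with
  | zero =>
    have h0 : (n - 1) % 2 = 0 := by omega
    simp [Nat.testBit_zero, h, h0]
  | succ i =>
    rw [Nat.testBit_and, Nat.testBit_add_one, Nat.testBit_add_one]
    have : (n - 1) / 2 = n / 2 := by omega
    rw [this, Bool.and_self]

-- n even and positive → n &&& (n-1) = 2 * ((n/2) &&& (n/2 - 1))
lemma and_pred_even (n : Nat) (h : n % 2 = 0) (hpos : 0 < n) :
    n &&& (n - 1) = 2 * ((n / 2) &&& (n / 2 - 1)) := by
  apply Nat.eq_of_testBit_eq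
  intro i
  cases i with
  | zero =>
    simp [Nat.testBit_zero, h, Nat.mul_mod_right]
  | succ i =>
    rw [Nat.testBit_and, Nat.testBit_add_one, Nat.testBit_add_one, Nat.testBit_add_one]
    have h1 : (n - 1) / 2 = n / 2 - 1 := by omega
    have h2 : 2 * ((n / 2) &&& (n / 2 - 1)) / 2 = (n / 2) &&& (n / 2 - 1) := by omega
    rw [h1, h2, Nat.testBit_and]

lemma pc_kern (n : Nat) (h : 0 < n) : pc (n &&& (n - 1)) + 1 = pc n := by
  induction n using Nat.strong_induction_on with
  | _ n ih =>
    by_cases h1 : n % 2 = 1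
    · rw [and_pred_odd n h1]
      have h2 : n - 1 = 2 * (n / 2) := by omega
      rw [h2, pc_double, pc_eq n, h1]
      omega
    · have h0 : n % 2 = 0 := by omega
      rw [and_pred_even n h0 h, pc_double]
      have ihh := ih (n / 2) (by omega) (by omega)
      rw [pc_eq n, h0, ihh]
      omega

lemma kernLoop_eq (n : Nat) : ∀ c : Int, kernLoop (↑n) c = c + ↑(pc n) := by
  induction n using Nat.strong_induction_on with
  | _ n ih =>
    intro c
    rw [kernLoop]
    by_cases h : 0 < n
    · rw [dif_pos (by exact_mod_cast h)]
      have hc : ((n : Int) - 1) = ((n - 1 : Nat) : Int) := by omega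
      rw [hc, PySem.Int.band_natCast]
      have hlt : n &&& (n - 1) < n := lt_of_le_of_lt Nat.and_le_right (by omega)
      rw [ih _ hlt]
      have := pc_kern n h
      omega
    · have h0 : n = 0 := by omega
      subst h0
      rw [dif_neg (by norm_num)]
      simp [pc_zero]

-- Python's bin digits: the binary character list of a natural number, msb first.
def binChars (n : Nat) : List Char :=
  if n < 2 then [Nat.digitChar n] else binChars (n / 2) ++ [Nat.digitChar (n % 2)]
decreasing_by exact Nat.div_lt_self (by omega) one_lt_two

lemma toDigitsCore_append (b : Nat) :
    ∀ (f n : Nat) (ds : List Char), Nat.toDigitsCore b f n ds = Nat.toDigitsCore b f n [] ++ ds := by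
  intro f
  induction f with
  | zero => intro n ds; simp [Nat.toDigitsCore]
  | succ f ih =>
    intro n ds
    simp only [Nat.toDigitsCore]
    by_cases h : n / b = 0
    · simp [h]
    · simp only [h, if_false]
      rw [ih (n / b) (Nat.digitChar (n % b) :: ds), ih (n / b) [Nat.digitChar (n % b)]]
      simp

lemma toDigitsCore_eq_binChars : ∀ f n : Nat, n < f → Nat.toDigitsCore 2 f n [] = binChars n := by
  intro f
  induction f with
  | zero => intro n h; omega
  | succ f ih =>
    intro n h
    simp only [Nat.toDigitsCore]
    by_cases h2 : n / 2 = 0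
    · have hn : n < 2 := by omega
      have hm : n % 2 = n := Nat.mod_eq_of_lt hn
      rw [binChars, if_pos hn, h2, if_pos rfl, hm]
    · rw [if_neg h2, toDigitsCore_append, ih (n / 2) (by omega)]
      rw [show binChars n = binChars (n / 2) ++ [Nat.digitChar (n % 2)] by
        rw [binChars]; exact if_neg (by omega)]

lemma toDigits_two_eq (n : Nat) : Nat.toDigits 2 n = binChars n :=
  toDigitsCore_eq_binChars (n + 1) n (by omega)

lemma binChars_mem (n : Nat) : ∀ c ∈ binChars n, c = '0' ∨ c = '1' := by
  induction n using Nat.strong_induction_on with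
  | _ n ih =>
    intro c hc
    rw [binChars] at hc
    by_cases h : n < 2
    · rw [if_pos h] at hc
      simp at hc
      subst hc
      interval_cases n
      · left; rfl
      · right; rfl
    · rw [if_neg h] at hc
      simp at hc
      rcases hc with hc | hc
      · exact ih (n / 2) (Nat.div_lt_self (by omega) one_lt_two) c hc
      · subst hc
        have : n % 2 = 0 ∨ n % 2 = 1 := by omega
        rcases this with h2 | h2 <;> rw [h2]
        · left; rfl
        · right; rfl

lemma binChars_ne_nil (n : Nat) : binChars n ≠ [] := by
  rw [binChars]
  by_cases h : n < 2 <;> simp [h]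

lemma binChars_length_pos (n : Nat) : 1 ≤ (binChars n).length :=
  List.length_pos_of_ne_nil (binChars_ne_nil n)

lemma binChars_lt (n : Nat) : n < 2 ^ (binChars n).length := by
  induction n using Nat.strong_induction_on with
  | _ n ih =>
    rw [binChars]
    by_cases h : n < 2
    · rw [if_pos h]
      simpa using h
    · rw [if_neg h]
      have := ih (n / 2) (Nat.div_lt_self (by omega) one_lt_two)
      simp only [List.length_append, List.length_singleton]
      rw [pow_succ]
      omega

-- the binary digits of a, lsb last, padded with '0' to length exactly k
def padChars : Nat → Nat → List Char
  | _, 0 => []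
  | a, k + 1 => padChars (a / 2) k ++ [Nat.digitChar (a % 2)]

lemma padChars_length (k : Nat) : ∀ a, (padChars a k).length = k := by
  induction k with
  | zero => intro a; rfl
  | succ k ih => intro a; simp [padChars, ih]

lemma padChars_zero (k : Nat) : padChars 0 k = List.replicate k '0' := by
  induction k with
  | zero => rfl
  | succ k ih => rw [padChars, ih, List.replicate_succ']; rfl

lemma padChars_eq (k : Nat) : ∀ a : Nat, (binChars a).length ≤ k →
    padChars a k = List.replicate (k - (binChars a).length) '0' ++ binChars a := by
  induction k with
  | zero => intro a h; have := binChars_length_pos a; omega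
  | succ k ih =>
    intro a h
    by_cases h2 : a < 2
    · have hb : binChars a = [Nat.digitChar a] := by rw [binChars, if_pos h2]
      have ha2 : a / 2 = 0 := by omega
      have ham : a % 2 = a := Nat.mod_eq_of_lt h2
      rw [padChars, ha2, padChars_zero, ham, hb]
      simp
    · have hb : binChars a = binChars (a / 2) ++ [Nat.digitChar (a % 2)] := by
        rw [binChars, if_neg h2]
      have hL : (binChars a).length = (binChars (a / 2)).length + 1 := by
        rw [hb]; simp
      have hle : (binChars (a / 2)).length ≤ k := by omega
      rw [padChars, ih (a / 2) hle, hb]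
      have hlen2 : (binChars (a / 2) ++ [Nat.digitChar (a % 2)]).length
          = (binChars (a / 2)).length + 1 := by simp
      rw [hlen2]
      have he : k + 1 - ((binChars (a / 2)).length + 1) = k - (binChars (a / 2)).length := by omega
      rw [he, List.append_assoc]

lemma zfill_eq (cs : List Char) (hne : cs ≠ []) (hd : ∀ c ∈ cs, c = '0' ∨ c = '1')
    (w : Int) (hw : 0 ≤ w) :
    PySem.Chars.zfill cs w = List.replicate (w.toNat - cs.length) '0' ++ cs := by
  rw [PySem.Chars.zfill.eq_def]
  by_cases h : w ≤ ↑cs.length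
  · rw [if_pos h]
    have h0 : w.toNat - cs.length = 0 := by omega
    rw [h0, List.replicate_zero, List.nil_append]
  · rw [if_neg h]
    cases cs with
    | nil => exact absurd rfl hne
    | cons c rest =>
      have hc := hd c List.mem_cons_self
      have hnc : ¬ (c = '+' ∨ c = '-') := by
        rcases hc with hc | hc <;> subst hc <;> decide
      show (if c = '+' ∨ c = '-' then
          c :: (List.replicate (w.toNat - (c :: rest).length) '0' ++ rest)
        else List.replicate (w.toNat - (c :: rest).length) '0' ++ (c :: rest)) = _
      rw [if_neg hnc]

-- central counting lemma: positionwise differing digits of the padded binaries = pc of the xor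
lemma count_pad (k : Nat) : ∀ a b : Nat, a < 2 ^ k → b < 2 ^ k →
    ((PySem.List.pyRange 0 (↑k) 1).countP fun i =>
      decide (PySem.List.pyGet? (padChars a k) i ≠ PySem.List.pyGet? (padChars b k) i)) =
    pc (a ^^^ b) := by
  induction k with
  | zero =>
    intro a b ha hb
    have ha0 : a = 0 := by omega
    have hb0 : b = 0 := by omega
    subst ha0; subst hb0
    rw [PySem.List.pyRange_one_eq_nil (by norm_num)]
    simp [pc_zero]
  | succ k ih =>
    intro a b ha hb
    have hpow : 2 ^ (k + 1) = 2 * 2 ^ k := by rw [pow_succ]; ring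
    have hcast : ((k + 1 : Nat) : Int) = (k : Int) + 1 := by push_cast; ring
    rw [hcast, PySem.List.pyRange_one_succ_right (by positivity)]
    rw [List.countP_append, List.countP_singleton]
    have hlen_a : (padChars (a / 2) k).length = k := padChars_length k _
    have hlen_b : (padChars (b / 2) k).length = k := padChars_length k _
    -- the first k indices see only the prefixes
    have hfirst : ((PySem.List.pyRange 0 (↑k) 1).countP fun i =>
        decide (PySem.List.pyGet? (padChars a (k+1)) i ≠ PySem.List.pyGet? (padChars b (k+1)) i)) =
        ((PySem.List.pyRange 0 (↑k) 1).countP fun i =>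
        decide (PySem.List.pyGet? (padChars (a/2) k) i ≠ PySem.List.pyGet? (padChars (b/2) k) i)) := by
      apply List.countP_congr
      intro i hi
      rw [PySem.List.mem_pyRange_one] at hi
      have hget : ∀ (x : Nat) (hx : (padChars (x/2) k).length = k),
          PySem.List.pyGet? (padChars x (k+1)) i = PySem.List.pyGet? (padChars (x/2) k) i := by
        intro x hx
        show PySem.List.pyGet? (padChars (x/2) k ++ [Nat.digitChar (x % 2)]) i = _
        rw [PySem.List.pyGet?_of_nonneg _ hi.1, PySem.List.pyGet?_of_nonneg _ hi.1]
        rw [List.getElem?_append_left (by omega)]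
      rw [hget a hlen_a, hget b hlen_b]
    rw [hfirst, ih (a/2) (b/2) (by omega) (by omega)]
    -- the last index sees the final digits
    have hlast : ∀ (x : Nat) (hx : (padChars (x/2) k).length = k),
        PySem.List.pyGet? (padChars x (k+1)) (↑k) = some (Nat.digitChar (x % 2)) := by
      intro x hx
      have h := PySem.List.pyGet?_append_length (padChars (x/2) k) [] (Nat.digitChar (x % 2))
      rw [hx] at h
      exact h
    rw [hlast a hlen_a, hlast b hlen_b]
    have hxd : (a ^^^ b) / 2 = a / 2 ^^^ b / 2 := Nat.xor_div_two
    have hxm : (a ^^^ b) % 2 = a % 2 ^^^ b % 2 := by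
      rw [← Nat.and_one_is_mod, ← Nat.and_one_is_mod, ← Nat.and_one_is_mod,
        Nat.and_xor_distrib_right]
    rw [pc_eq (a ^^^ b), hxd, hxm]
    have ha2 : a % 2 = 0 ∨ a % 2 = 1 := by omega
    have hb2 : b % 2 = 0 ∨ b % 2 = 1 := by omega
    rcases ha2 with h1 | h1 <;> rcases hb2 with h2 | h2 <;> rw [h1, h2] <;> simp [Nat.digitChar] <;> omega

-- A's fold over a pair of padded binary strings computes pc of the xor
lemma fold_string (s t : String) (N a b : Nat)
    (hs : s.toList = padChars a N) (ht : t.toList = padChars b N)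
    (ha : a < 2 ^ N) (hb : b < 2 ^ N) :
    (PySem.List.pyRange 0 (↑N) 1).foldl
      (fun ans i => if PySem.Str.pyGet? s i ≠ PySem.Str.pyGet? t i then ans + 1 else ans) (0 : Int) =
    ↑(pc (a ^^^ b)) := by
  rw [PySem.List.foldl_ite_add_one (fun i => PySem.Str.pyGet? s i ≠ PySem.Str.pyGet? t i)]
  have hbridge : ∀ (u : String) (i : Int), PySem.Str.pyGet? u i = PySem.List.pyGet? u.toList i := by
    intro u i
    simp
  have : ((PySem.List.pyRange 0 (↑N) 1).countP fun i =>
      decide (PySem.Str.pyGet? s i ≠ PySem.Str.pyGet? t i)) =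
      ((PySem.List.pyRange 0 (↑N) 1).countP fun i =>
      decide (PySem.List.pyGet? (padChars a N) i ≠ PySem.List.pyGet? (padChars b N) i)) := by
    apply List.countP_congr
    intro i _
    rw [hbridge s i, hbridge t i, hs, ht]
  rw [this, count_pad N a b ha hb]
  omega

-- masking helpers
lemma band_mask_nonneg (x : Int) (hx : 0 ≤ x) :
    (PySem.Int.band x 0xFFFFFFFF).toNat = x.toNat % 2 ^ 32 := by
  rw [PySem.Int.band, if_pos hx, if_pos (by norm_num)]
  have h1 : ((0xFFFFFFFF : Int)).toNat = 2 ^ 32 - 1 := by decide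
  rw [Int.toNat_natCast, h1, Nat.and_two_pow_sub_one_eq_mod]

lemma band_mask_neg (x : Int) (hx : ¬ 0 ≤ x) :
    (PySem.Int.band x 0xFFFFFFFF).toNat = (2 ^ 32 - 1) - (-x - 1).toNat % 2 ^ 32 := by
  rw [PySem.Int.band, if_neg hx, if_pos (by norm_num)]
  have h1 : ((0xFFFFFFFF : Int)).toNat = 2 ^ 32 - 1 := by decide
  rw [Int.toNat_natCast, h1, Nat.and_comm, Nat.and_two_pow_sub_one_eq_mod]

lemma mod_pow_xor (x y k : Nat) : (x ^^^ y) % 2 ^ k = x % 2 ^ k ^^^ y % 2 ^ k := by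
  rw [← Nat.and_two_pow_sub_one_eq_mod, ← Nat.and_two_pow_sub_one_eq_mod,
    ← Nat.and_two_pow_sub_one_eq_mod, Nat.and_xor_distrib_right]

lemma mask_xor_compl (k : Nat) : ∀ x : Nat, x < 2 ^ k → (2 ^ k - 1) ^^^ x = (2 ^ k - 1) - x := by
  induction k with
  | zero => intro x hx; interval_cases x; rfl
  | succ k ih =>
    intro x hx
    have hp : 0 < 2 ^ k := pow_pos (by norm_num) k
    have hpow : 2 ^ (k + 1) = 2 * 2 ^ k := by rw [pow_succ]; ring
    have hdiv : ((2 ^ (k+1) - 1) ^^^ x) / 2 = (2 ^ k - 1) ^^^ (x / 2) := by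
      rw [Nat.xor_div_two]; congr 1; omega
    have hmod : ((2 ^ (k+1) - 1) ^^^ x) % 2 = 1 ^^^ (x % 2) := by
      rw [← Nat.and_one_is_mod, ← Nat.and_one_is_mod, Nat.and_xor_distrib_right,
        Nat.and_one_is_mod, Nat.and_one_is_mod]
      congr 1; omega
    have hih := ih (x / 2) (by omega)
    rw [hih] at hdiv
    have hrec := Nat.div_add_mod ((2 ^ (k+1) - 1) ^^^ x) 2
    have hx2 : x % 2 = 0 ∨ x % 2 = 1 := by omega
    rcases hx2 with h2 | h2 <;> rw [h2] at hmod
    · have : (1 ^^^ 0 : Nat) = 1 := by decide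
      rw [this] at hmod; omega
    · have : (1 ^^^ 1 : Nat) = 0 := by decide
      rw [this] at hmod; omega

lemma sub_xor (k u v : Nat) (hu : u < 2 ^ k) (hv : v < 2 ^ k) :
    u ^^^ ((2 ^ k - 1) - v) = (2 ^ k - 1) - (u ^^^ v) := by
  rw [← mask_xor_compl k v hv, ← Nat.xor_assoc, Nat.xor_comm u (2 ^ k - 1), Nat.xor_assoc,
    mask_xor_compl k (u ^^^ v) (Nat.xor_lt_two_pow hu hv)]

lemma sub_xor' (k u v : Nat) (hu : u < 2 ^ k) (hv : v < 2 ^ k) :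
    ((2 ^ k - 1) - u) ^^^ v = (2 ^ k - 1) - (u ^^^ v) := by
  rw [Nat.xor_comm, sub_xor k v u hv hu, Nat.xor_comm]

lemma sub_xor_sub (k u v : Nat) (hu : u < 2 ^ k) (hv : v < 2 ^ k) :
    ((2 ^ k - 1) - u) ^^^ ((2 ^ k - 1) - v) = u ^^^ v := by
  rw [← mask_xor_compl k u hu, ← mask_xor_compl k v hv, Nat.xor_comm (2 ^ k - 1) u,
    Nat.xor_assoc, ← Nat.xor_assoc (2 ^ k - 1) (2 ^ k - 1), Nat.xor_self, Nat.zero_xor]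

-- the masked xor agrees with the xor of the masked operands
lemma bridge_xor (A B : Int) :
    (PySem.Int.band (PySem.Int.bxor A B) 0xFFFFFFFF).toNat =
    (PySem.Int.band A 0xFFFFFFFF).toNat ^^^ (PySem.Int.band B 0xFFFFFFFF).toNat := by
  have hM : ∀ y : Nat, y % 2 ^ 32 < 2 ^ 32 := fun y => Nat.mod_lt _ (by norm_num)
  by_cases h1 : 0 ≤ A <;> by_cases h2 : 0 ≤ B
  · have hx : PySem.Int.bxor A B = ↑(A.toNat ^^^ B.toNat) := PySem.Int.bxor_of_nonneg h1 h2
    rw [hx, band_mask_nonneg _ (by positivity), band_mask_nonneg _ h1, band_mask_nonneg _ h2,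
      Int.toNat_natCast, mod_pow_xor]
  · have hx : PySem.Int.bxor A B = -↑(A.toNat ^^^ (-B - 1).toNat) - 1 := by
      rw [PySem.Int.bxor, if_pos h1, if_neg h2]
    have hneg : ¬ 0 ≤ PySem.Int.bxor A B := by
      rw [hx]; have := Int.natCast_nonneg (A.toNat ^^^ (-B - 1).toNat); omega
    rw [band_mask_neg _ hneg, band_mask_nonneg _ h1, band_mask_neg _ h2]
    have harg : (-(PySem.Int.bxor A B) - 1).toNat = A.toNat ^^^ (-B - 1).toNat := by
      rw [hx]; omega
    rw [harg, mod_pow_xor, sub_xor 32 _ _ (hM _) (hM _)]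
  · have hx : PySem.Int.bxor A B = -↑((-A - 1).toNat ^^^ B.toNat) - 1 := by
      rw [PySem.Int.bxor, if_neg h1, if_pos h2]
    have hneg : ¬ 0 ≤ PySem.Int.bxor A B := by
      rw [hx]; have := Int.natCast_nonneg ((-A - 1).toNat ^^^ B.toNat); omega
    rw [band_mask_neg _ hneg, band_mask_neg _ h1, band_mask_nonneg _ h2]
    have harg : (-(PySem.Int.bxor A B) - 1).toNat = (-A - 1).toNat ^^^ B.toNat := by
      rw [hx]; omega
    rw [harg, mod_pow_xor, sub_xor' 32 _ _ (hM _) (hM _)]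
  · have hx : PySem.Int.bxor A B = ↑((-A - 1).toNat ^^^ (-B - 1).toNat) := by
      rw [PySem.Int.bxor, if_neg h1, if_neg h2]
    rw [hx, band_mask_nonneg _ (by positivity), band_mask_neg _ h1, band_mask_neg _ h2,
      Int.toNat_natCast, mod_pow_xor, sub_xor_sub 32 _ _ (hM _) (hM _)]

-- the sliced bin() string of a masked value is binChars of its Nat value
lemma slice_bin (x : Int) (hx : 0 ≤ x) :
    (PySem.Str.slice (PySem.Int.pyBin x) (some 2) none).toList = binChars x.toNat := by
  rw [PySem.Str.toList_slice, PySem.Int.toList_pyBin, PySem.Int.toBinChars0b,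
    if_neg (by omega), PySem.Chars.slice_eq_listSlice, PySem.List.slice_from _ (by norm_num)]
  show Nat.toDigits 2 x.toNat = binChars x.toNat
  exact toDigits_two_eq _

lemma portA_eq (A B : Int) :
    convertInteger A B =
    ↑(pc ((PySem.Int.band A 0xFFFFFFFF).toNat ^^^ (PySem.Int.band B 0xFFFFFFFF).toNat)) := by
  have hA : 0 ≤ PySem.Int.band A 0xFFFFFFFF := by
    rw [PySem.Int.band_comm]
    exact PySem.Int.band_nonneg_of_nonneg_left _ (by norm_num)
  have hB : 0 ≤ PySem.Int.band B 0xFFFFFFFF := by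
    rw [PySem.Int.band_comm]
    exact PySem.Int.band_nonneg_of_nonneg_left _ (by norm_num)
  set s1 := PySem.Str.slice (PySem.Int.pyBin (PySem.Int.band A 0xFFFFFFFF)) (some 2) none with hs1def
  set s2 := PySem.Str.slice (PySem.Int.pyBin (PySem.Int.band B 0xFFFFFFFF)) (some 2) none with hs2def
  set a := (PySem.Int.band A 0xFFFFFFFF).toNat with hadef
  set b := (PySem.Int.band B 0xFFFFFFFF).toNat with hbdef
  have hl1 : s1.toList = binChars a := slice_bin _ hA
  have hl2 : s2.toList = binChars b := slice_bin _ hB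
  set N := max (binChars a).length (binChars b).length with hNdef
  have hlen : max (PySem.Str.len s1) (PySem.Str.len s2) = ↑N := by
    rw [PySem.Str.len_eq, PySem.Str.len_eq, hl1, hl2, hNdef, Nat.cast_max]
  have hz : ∀ (u : String) (x : Nat), u.toList = binChars x → (binChars x).length ≤ N →
      (PySem.Str.zfill u (↑N)).toList = padChars x N := by
    intro u x hu hle
    rw [PySem.Str.toList_zfill, hu,
      zfill_eq (binChars x) (binChars_ne_nil x) (binChars_mem x) _ (by positivity),
      Int.toNat_natCast, padChars_eq N x hle]
  have hbound : ∀ (x : Nat), (binChars x).length ≤ N → x < 2 ^ N := by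
    intro x hle
    exact lt_of_lt_of_le (binChars_lt x) (Nat.pow_le_pow_right (by norm_num) hle)
  have hunf : convertInteger A B =
      (PySem.List.pyRange 0 (max (PySem.Str.len s1) (PySem.Str.len s2)) 1).foldl
        (fun ans i =>
          if PySem.Str.pyGet? (PySem.Str.zfill s1 (max (PySem.Str.len s1) (PySem.Str.len s2))) i ≠
             PySem.Str.pyGet? (PySem.Str.zfill s2 (max (PySem.Str.len s1) (PySem.Str.len s2))) i
          then ans + 1 else ans) 0 := rfl
  rw [hunf, hlen]
  exact fold_string (PySem.Str.zfill s1 (↑N)) (PySem.Str.zfill s2 (↑N)) N a b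
    (hz s1 a hl1 (le_max_left _ _)) (hz s2 b hl2 (le_max_right _ _))
    (hbound a (le_max_left _ _)) (hbound b (le_max_right _ _))

-- ===== VERDICT (by name: the statement is the Claim_ definition above) =====
theorem convertInteger_spec : Claim_equal_convertInteger := by
  intro A B _
  unfold Spec_convertInteger
  rw [portA_eq]
  unfold convertInteger_alt
  have h0 : 0 ≤ PySem.Int.band (PySem.Int.bxor A B) 0xFFFFFFFF := by
    rw [PySem.Int.band_comm]
    exact PySem.Int.band_nonneg_of_nonneg_left _ (by norm_num)
  rw [show PySem.Int.band (PySem.Int.bxor A B) 0xFFFFFFFF =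
      ↑((PySem.Int.band (PySem.Int.bxor A B) 0xFFFFFFFF).toNat) from (Int.toNat_of_nonneg h0).symm,
    kernLoop_eq, bridge_xor]
  omega
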